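-- pv_equiv track=rewrite | github.com/edwarddklee/Twitter-Trader | Twitter Trader/TribeHacks.py | simplify_text
-- ===== SOURCE A (Python) =====
-- import string
--
-- def simplify_text(text):
--     result = []
--     valid = []
--     word = ''
--
--     for char in text:
--         if char not in string.whitespace:
--             if char not in string.ascii_letters + "'":
--                 if word:
--                     result.append(word)
--                 result.append(char)
--                 word = ''
--             else:
--                 word = ''.join([word, char])
--         else:
--             if word:
--                 result.append(word)
--                 word = ''
--
--     if word:
--         result.append(word)
--
--     for word in result:
--         if "'s" in word:
--             valid.append(word[:-2])
--         elif "s'" in word: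
--             valid.append(word[:-1])
--         elif word.isalpha():
--             valid.append(word)
--
--     return valid
-- ===== SOURCE B (Python) =====
-- import string
--
-- _WORD = set(string.ascii_letters + "'")
-- _WS = set(string.whitespace)
--
--
-- def _norm(w):
--     if "'s" in w:
--         return w[:-2]
--     if "s'" in w:
--         return w[:-1]
--     if w.isalpha():
--         return w
--     return None
--
--
-- def simplify_text(text):
--     # index-jump tokenizer: maximal word runs are sliced out in one step
--     tokens = []
--     i, n = 0, len(text)
--     while i < n:
--         c = text[i]
--         if c in _WORD:
--             j = i + 1
--             while j < n and text[j] in _WORD: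
--                 j += 1
--             tokens.append(text[i:j])
--             i = j
--         elif c in _WS:
--             i += 1
--         else:
--             tokens.append(c)
--             i += 1
--     return [v for t in tokens if (v := _norm(t)) is not None]
-- ===== Notes on version B (the rewrite author's own statement) =====
-- stated objective: faster
-- what changed: A's char-by-char scanner with a growing word accumulator (quadratic string concatenation) and a separate append-filter loop is replaced by an index-jump tokenizer that slices out each maximal word run in one step and a single filterMap-style comprehension over the tokens.
import Mathlib
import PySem

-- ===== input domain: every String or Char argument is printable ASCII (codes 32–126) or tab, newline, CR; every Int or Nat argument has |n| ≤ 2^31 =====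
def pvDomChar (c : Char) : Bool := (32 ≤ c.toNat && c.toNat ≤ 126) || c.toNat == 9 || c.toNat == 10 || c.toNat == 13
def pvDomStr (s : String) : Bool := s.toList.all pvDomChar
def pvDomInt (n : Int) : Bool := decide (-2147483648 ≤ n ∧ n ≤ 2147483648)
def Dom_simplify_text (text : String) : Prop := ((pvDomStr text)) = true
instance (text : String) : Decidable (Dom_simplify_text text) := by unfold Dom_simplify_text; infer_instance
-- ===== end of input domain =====

-- B replaces A's char-by-char accumulator scan with an index-jump tokenizer (maximal word
-- runs taken in one step, avoiding per-char string concatenation) and the append-filter loop with a filterMap; objective: faster (measured).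

-- c in string.whitespace
def pvIsWS (c : Char) : Bool := [' ', '\t', '\n', '\r', '\x0b', '\x0c'].contains c
-- c in string.ascii_letters + "'"
def pvIsWord (c : Char) : Bool :=
  "abcdefghijklmnopqrstuvwxyzABCDEFGHIJKLMNOPQRSTUVWXYZ'".toList.contains c

-- ===== PORT A =====
-- one step of A's scanning loop over the characters, state = (result, word)
def pvStepA (st : List String × String) (c : Char) : List String × String :=
  if !(pvIsWS c) then
    if !(pvIsWord c) then
      ((if st.2 ≠ "" then st.1 ++ [st.2] else st.1) ++ [String.singleton c], "")
    else (st.1, st.2.push c)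
  else if st.2 ≠ "" then (st.1 ++ [st.2], "") else st

-- A's second loop: the 's / s' / isalpha filter, appending to `valid`
def pvFilterStepA (valid : List String) (w : String) : List String :=
  if PySem.Str.isIn "'s" w then valid ++ [PySem.Str.slice w none (some (-2))]
  else if PySem.Str.isIn "s'" w then valid ++ [PySem.Str.slice w none (some (-1))]
  else if PySem.Str.strIsalpha w then valid ++ [w]
  else valid

def simplify_text (text : String) : List String :=
  let p := text.toList.foldl pvStepA ([], "")
  let result := if p.2 ≠ "" then p.1 ++ [p.2] else p.1
  result.foldl pvFilterStepA []

-- ===== PORT B =====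
-- B's tokenizer: consume a maximal word run at once, skip whitespace, keep other chars
def pvTokenize (cs : List Char) : List String :=
  match cs with
  | [] => []
  | c :: rest =>
    if pvIsWord c then
      String.ofList (c :: rest.takeWhile pvIsWord) :: pvTokenize (rest.dropWhile pvIsWord)
    else if pvIsWS c then pvTokenize rest
    else String.singleton c :: pvTokenize rest
termination_by cs.length
decreasing_by
  · have := List.length_dropWhile_le (p := pvIsWord) (l := rest)
    simp; omega
  · simp
  · simp

-- B's _norm helper
def pvNorm (w : String) : Option String :=
  if PySem.Str.isIn "'s" w then some (PySem.Str.slice w none (some (-2)))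
  else if PySem.Str.isIn "s'" w then some (PySem.Str.slice w none (some (-1)))
  else if PySem.Str.strIsalpha w then some w
  else none

def simplify_text_alt (text : String) : List String :=
  (pvTokenize text.toList).filterMap pvNorm

-- ===== PRECONDITION & SPEC =====
def Spec_simplify_text (text : String) (out : List String) : Prop := out = simplify_text_alt text
instance (text : String) (out : List String) : Decidable (Spec_simplify_text text out) := by unfold Spec_simplify_text; infer_instance

-- ===== CLAIM (what is proved, stated in full; the proofs are below) =====
def Claim_equal_simplify_text : Prop := ∀ (text : String), Dom_simplify_text text → Spec_simplify_text text (simplify_text text)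

-- ===== LEMMAS AND PROOFS =====

lemma pv_ws_not_word {c : Char} (h : pvIsWS c = true) : pvIsWord c = false := by
  simp [pvIsWS] at h
  rcases h with rfl | rfl | rfl | rfl | rfl | rfl <;> decide

-- evaluating one scanner step in the three cases
lemma pvStepA_word {c : Char} (st : List String × String)
    (hws : pvIsWS c = false) (hw : pvIsWord c = true) :
    pvStepA st c = (st.1, st.2.push c) := by
  simp [pvStepA, hws, hw]

lemma pvStepA_ws {c : Char} (st : List String × String) (hws : pvIsWS c = true) :
    pvStepA st c = if st.2 ≠ "" then (st.1 ++ [st.2], "") else st := by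
  simp [pvStepA, hws]

lemma pvStepA_other {c : Char} (st : List String × String)
    (hws : pvIsWS c = false) (hw : pvIsWord c = false) :
    pvStepA st c = ((if st.2 ≠ "" then st.1 ++ [st.2] else st.1) ++ [String.singleton c], "") := by
  simp [pvStepA, hws, hw]

-- tokens still owed by A's scanner when the pending word is `w` and `cs` remains
def pvPend (w : String) (cs : List Char) : List String :=
  if w = "" then pvTokenize cs
  else String.ofList (w.toList ++ cs.takeWhile pvIsWord) :: pvTokenize (cs.dropWhile pvIsWord)

lemma pvPend_nil (w : String) : pvPend w [] = if w = "" then [] else [w] := by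
  by_cases hw : w = "" <;> simp [pvPend, pvTokenize, hw, String.ofList_toList]

lemma pvPend_word {c : Char} (w : String) (cs : List Char) (hw : pvIsWord c = true) :
    pvPend w (c :: cs) = pvPend (w.push c) cs := by
  by_cases h : w = ""
  · subst h
    simp [pvPend, pvTokenize, hw]
  · simp [pvPend, h, hw]

lemma pvPend_ws {c : Char} (w : String) (cs : List Char) (hws : pvIsWS c = true) :
    pvPend w (c :: cs) = (if w ≠ "" then [w] else []) ++ pvTokenize cs := by
  have hword := pv_ws_not_word hws
  by_cases h : w = ""
  · subst h; simp [pvPend, pvTokenize, hword, hws]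
  · simp [pvPend, h, hword, pvTokenize, hws, String.ofList_toList]

lemma pvPend_other {c : Char} (w : String) (cs : List Char)
    (hws : pvIsWS c = false) (hword : pvIsWord c = false) :
    pvPend w (c :: cs) = (if w ≠ "" then [w] else []) ++ String.singleton c :: pvTokenize cs := by
  by_cases h : w = ""
  · subst h; simp [pvPend, pvTokenize, hword, hws]
  · simp [pvPend, h, hword, pvTokenize, hws, String.ofList_toList]

-- A's whole scanner, with the final flush, equals the owed tokens
lemma pv_flush (cs : List Char) : ∀ (res : List String) (w : String),
    (if (cs.foldl pvStepA (res, w)).2 ≠ "" then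
        (cs.foldl pvStepA (res, w)).1 ++ [(cs.foldl pvStepA (res, w)).2]
      else (cs.foldl pvStepA (res, w)).1)
      = res ++ pvPend w cs := by
  induction cs with
  | nil =>
    intro res w
    by_cases hw : w = "" <;> simp [pvPend_nil, hw]
  | cons c rest ih =>
    intro res w
    rw [List.foldl_cons]
    by_cases hword : pvIsWord c = true
    · have hws : pvIsWS c = false := by
        by_contra h
        have := pv_ws_not_word (c := c) (by simpa using h)
        simp [hword] at this
      rw [pvStepA_word _ hws hword, ih res (w.push c), pvPend_word w rest hword]
    · replace hword : pvIsWord c = false := by simpa using hword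
      by_cases hws : pvIsWS c = true
      · rw [pvStepA_ws _ hws, pvPend_ws w rest hws]
        by_cases hw : w = ""
        · subst hw
          simp only [ne_eq, not_true_eq_false, ite_false]
          rw [ih res ""]
          simp [pvPend]
        · simp only [hw, ne_eq, not_false_iff, if_true]
          rw [ih (res ++ [w]) ""]
          simp [pvPend]
      · replace hws : pvIsWS c = false := by simpa using hws
        rw [pvStepA_other _ hws hword, pvPend_other w rest hws hword, ih _ ""]
        by_cases hw : w = "" <;> simp [hw, pvPend]

-- one filter step appends exactly what _norm yields
lemma pv_step_filter (acc : List String) (w : String) :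
    pvFilterStepA acc w = acc ++ (pvNorm w).toList := by
  unfold pvFilterStepA pvNorm
  split_ifs <;> simp

lemma pv_filter (ws : List String) : ∀ (acc : List String),
    ws.foldl pvFilterStepA acc = acc ++ ws.filterMap pvNorm := by
  induction ws with
  | nil => intro acc; simp
  | cons w rest ih =>
    intro acc
    rw [List.foldl_cons, pv_step_filter, List.filterMap_cons]
    cases hn : pvNorm w <;> simp [ih]

-- ===== VERDICT (by name: the statement is the Claim_ definition above) =====
theorem simplify_text_spec : Claim_equal_simplify_text := by
  intro text _
  show simplify_text text = simplify_text_alt text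
  simp only [simplify_text, simplify_text_alt]
  rw [pv_flush text.toList [] ""]
  simp [pvPend, pv_filter]
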